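-- pv_equiv track=rewrite | github.com/posl/comment_recommendation | script/mod_gen/3_time/zh/189_C/5.py | get_max_orange_count
-- ===== SOURCE A (Python) =====
-- def get_max_orange_count(orange_count_list):
--     max_orange_count = 0
--     for i in range(len(orange_count_list)):
--         for j in range(i, len(orange_count_list)):
--             for k in range(1, max(orange_count_list[i:j+1])+1):
--                 orange_count = 0
--                 for l in range(i, j+1):
--                     if orange_count_list[l] >= k:
--                         orange_count += k
--                 if orange_count > max_orange_count:
--                     max_orange_count = orange_count
--     return max_orange_count
-- ===== SOURCE B (Python) =====
-- def get_max_orange_count(orange_count_list):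
--     # The best window is always the whole array (a superset can only raise the
--     # count for any threshold k), and the best threshold k is always the value
--     # of some element (count(>=k) is constant between consecutive values), so:
--     best = 0
--     for v in orange_count_list:
--         cand = v * sum(1 for x in orange_count_list if x >= v) if v > 0 else 0
--         if cand > best:
--             best = cand
--     return best
-- ===== Notes on version B (the rewrite author's own statement) =====
-- stated objective: faster
-- what changed: B drops the enumeration of all O(n^2) windows and of every threshold k from 1 to the window maximum: since the whole array is always an optimal window and an optimal threshold is always some element's value, B takes one pass over the values v > 0 and maximises v * count(elements >= v).
import Mathlib
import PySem

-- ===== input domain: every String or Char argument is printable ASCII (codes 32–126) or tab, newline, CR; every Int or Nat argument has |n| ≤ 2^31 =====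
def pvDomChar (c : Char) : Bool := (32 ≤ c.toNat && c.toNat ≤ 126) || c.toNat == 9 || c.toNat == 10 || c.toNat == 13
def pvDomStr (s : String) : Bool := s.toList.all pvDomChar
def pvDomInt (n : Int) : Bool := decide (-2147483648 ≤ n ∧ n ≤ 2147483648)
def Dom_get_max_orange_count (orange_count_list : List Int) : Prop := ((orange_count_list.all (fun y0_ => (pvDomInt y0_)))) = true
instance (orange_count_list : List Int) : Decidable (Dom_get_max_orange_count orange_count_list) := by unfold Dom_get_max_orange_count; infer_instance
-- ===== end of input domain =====

-- B replaces A's scan over all windows and all thresholds 1..max by a single pass over the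
-- element values (the whole array is always the best window and the best threshold is always
-- an element's value); objective: faster.

-- ===== PORT A =====
-- A-side helpers: the innermost sum loop and the window maximum, named for the proofs.
def pvInnerSum (l : List Int) (i j k : Int) : Int :=
  (PySem.List.pyRange i (j+1)).foldl
    (fun oc li => if PySem.List.pyGetD l li 0 ≥ k then oc + k else oc) 0

-- max(l[i:j+1]): the slice is nonempty whenever 0 ≤ i ≤ j < len l (A's loop bounds), so the
-- `.getD 0` default is never used there and the port is exact on A's domain.
def pvWinMax (l : List Int) (i j : Int) : Int :=
  ((PySem.List.max? (PySem.List.slice l (some i) (some (j+1))) (fun x => x)).getD 0)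

def get_max_orange_count (orange_count_list : List Int) : Int :=
  (PySem.List.pyRange 0 (PySem.List.len orange_count_list)).foldl (fun acc i =>
    (PySem.List.pyRange i (PySem.List.len orange_count_list)).foldl (fun acc j =>
      (PySem.List.pyRange 1 (pvWinMax orange_count_list i j + 1)).foldl (fun acc k =>
        let oc := pvInnerSum orange_count_list i j k
        if oc > acc then oc else acc) acc) acc) 0

-- ===== PORT B =====
-- B-side helper: sum(1 for x in orange_count_list if x >= v)
def pvCountGe (l : List Int) (v : Int) : Int :=
  l.foldl (fun s x => if x ≥ v then s + 1 else s) 0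

def get_max_orange_count_alt (orange_count_list : List Int) : Int :=
  orange_count_list.foldl (fun best v =>
    let cand := if v > 0 then v * pvCountGe orange_count_list v else 0
    if cand > best then cand else best) 0

-- ===== PRECONDITION & SPEC =====
def Spec_get_max_orange_count (orange_count_list : List Int) (out : Int) : Prop := out = get_max_orange_count_alt orange_count_list
instance (orange_count_list : List Int) (out : Int) : Decidable (Spec_get_max_orange_count orange_count_list out) := by unfold Spec_get_max_orange_count; infer_instance

-- ===== CLAIM (what is proved, stated in full; the proofs are below) =====
def Claim_equal_get_max_orange_count : Prop := ∀ (orange_count_list : List Int), Dom_get_max_orange_count orange_count_list → Spec_get_max_orange_count orange_count_list (get_max_orange_count orange_count_list)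

-- ===== LEMMAS AND PROOFS =====

-- generic facts about running-maximum folds with Int accumulator
theorem pv_foldl_mono {α : Type} (xs : List α) (step : Int → α → Int) (a : Int)
    (h : ∀ acc x, acc ≤ step acc x) : a ≤ xs.foldl step a := by
  induction xs generalizing a with
  | nil => simp
  | cons x t ih => exact le_trans (h a x) (ih (step a x))

theorem pv_foldl_reach {α : Type} (xs : List α) (step : Int → α → Int) (P : α → Int → Prop) (a : Int)
    (h : ∀ acc x, step acc x = acc ∨ P x (step acc x)) :
    xs.foldl step a = a ∨ ∃ x ∈ xs, P x (xs.foldl step a) := by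
  induction xs generalizing a with
  | nil => left; rfl
  | cons x t ih =>
    rcases ih (step a x) with h1 | h1
    · rcases h a x with h2 | h2
      · left; rw [List.foldl_cons, h1, h2]
      · right; exact ⟨x, List.mem_cons_self, by rw [List.foldl_cons, h1]; exact h2⟩
    · right
      obtain ⟨y, hy, hP⟩ := h1
      exact ⟨y, List.mem_cons_of_mem _ hy, by rw [List.foldl_cons]; exact hP⟩

theorem pv_foldl_ge {α : Type} (xs : List α) (step : Int → α → Int) (a : Int)
    (hmono : ∀ acc x, acc ≤ step acc x) (x : α) (hx : x ∈ xs) (c : Int)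
    (hc : ∀ acc, c ≤ step acc x) : c ≤ xs.foldl step a := by
  induction xs generalizing a with
  | nil => cases hx
  | cons y t ih =>
    rcases List.mem_cons.mp hx with rfl | hmem
    · exact le_trans (hc a) (pv_foldl_mono t step _ hmono)
    · exact ih (step a y) hmem

-- 'if p x: acc += c' over a list is c times a countP
theorem pv_foldl_if_add_const {α : Type} (p : α → Prop) [DecidablePred p] (c : Int) (l : List α) (a : Int) :
    l.foldl (fun acc x => if p x then acc + c else acc) a
      = a + c * (l.countP (fun x => decide (p x)) : Int) := by
  induction l generalizing a with
  | nil => simp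
  | cons x t ih =>
    rw [List.foldl_cons, ih, List.countP_cons]
    by_cases hp : p x
    · simp only [hp, if_true, decide_true, Nat.cast_add, Nat.cast_one]; ring
    · simp [hp]

-- the index range a..b-1 read through pyGetD is the window (l.drop a).take (b - a)
theorem pv_window_map_aux (l : List Int) (b : Nat) (hb : b ≤ l.length) :
    ∀ n a : Nat, b - a = n →
      (PySem.List.pyRange (a : Int) (b : Int)).map (fun li => PySem.List.pyGetD l li 0)
        = (l.drop a).take n := by
  intro n
  induction n with
  | zero =>
    intro a ha
    rw [PySem.List.pyRange_one_eq_nil (by omega), List.take_zero, List.map_nil]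
  | succ m ih =>
    intro a ha
    have hab : a < b := by omega
    have hal : a < l.length := by omega
    rw [PySem.List.pyRange_one_cons (by exact_mod_cast hab), List.map_cons]
    have hd : l.drop a = l[a] :: l.drop (a + 1) := (List.getElem_cons_drop hal).symm
    rw [hd, List.take_succ_cons]
    have h1 : ((a : Int) + 1) = ((a + 1 : Nat) : Int) := by push_cast; ring
    rw [h1, ih (a + 1) (by omega)]
    congr 1
    simp [PySem.List.pyGetD_natCast, List.getD_eq_getElem?_getD, hal]

-- the inner sum of A is k * (count of window elements ≥ k)
theorem pv_innerSum_eq (l : List Int) (a c : Nat) (hc : c < l.length) (k : Int) :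
    pvInnerSum l (a : Int) (c : Int) k
      = k * (((l.drop a).take (c + 1 - a)).countP (fun x => decide (k ≤ x)) : Int) := by
  unfold pvInnerSum
  have h1 : ((c : Int) + 1) = ((c + 1 : Nat) : Int) := by push_cast; ring
  have hmap := pv_window_map_aux l (c + 1) (by omega) (c + 1 - a) a rfl
  have hfold : (PySem.List.pyRange (a : Int) ((c + 1 : Nat) : Int)).foldl
      (fun oc li => if PySem.List.pyGetD l li 0 ≥ k then oc + k else oc) 0
      = (((PySem.List.pyRange (a : Int) ((c + 1 : Nat) : Int)).map
          (fun li => PySem.List.pyGetD l li 0)).foldl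
          (fun oc x => if x ≥ k then oc + k else oc) 0) :=
    (List.foldl_map (f := fun li => PySem.List.pyGetD l li 0)
      (g := fun oc x => if x ≥ k then oc + k else oc)
      (l := PySem.List.pyRange (a : Int) ((c + 1 : Nat) : Int)) (init := 0)).symm
  rw [h1, hfold, hmap, pv_foldl_if_add_const (fun x => k ≤ x) k]
  simp

-- the whole list as a window
theorem pv_window_all (l : List Int) (hl : l ≠ []) :
    (l.drop 0).take (l.length - 1 + 1 - 0) = l := by
  have : l.length - 1 + 1 - 0 = l.length := by
    have : 0 < l.length := List.length_pos_iff.mpr hl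
    omega
  simp [this]

-- B as a running max over the mapped candidate list
theorem pv_B_eq (l : List Int) :
    get_max_orange_count_alt l
      = (l.map (fun v => if v > 0 then v * pvCountGe l v else 0)).foldl max 0 := by
  unfold get_max_orange_count_alt
  rw [List.foldl_map]
  apply PySem.List.foldl_congr_mem
  intro acc v _
  rcases le_total ((if v > 0 then v * pvCountGe l v else 0)) acc with h | h
  · simp only [max_def]
    split_ifs <;> omega
  · simp only [max_def]
    split_ifs <;> omega

theorem pv_B_nonneg (l : List Int) : 0 ≤ get_max_orange_count_alt l := by
  rw [pv_B_eq]
  exact (PySem.List.le_foldl_max _ _).1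

theorem pv_cand_le_B (l : List Int) (v : Int) (hv : v ∈ l) :
    (if v > 0 then v * pvCountGe l v else 0) ≤ get_max_orange_count_alt l := by
  rw [pv_B_eq]
  exact (PySem.List.le_foldl_max _ _).2 _ (List.mem_map_of_mem hv)

-- pvCountGe as a countP
theorem pv_countGe_eq (l : List Int) (v : Int) :
    pvCountGe l v = (l.countP (fun x => decide (v ≤ x)) : Int) := by
  unfold pvCountGe
  rw [pv_foldl_if_add_const (fun x => v ≤ x) 1]
  simp

theorem pv_A_nonneg (l : List Int) : 0 ≤ get_max_orange_count l := by
  unfold get_max_orange_count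
  apply pv_foldl_mono
  intro acc i
  apply pv_foldl_mono
  intro acc j
  apply pv_foldl_mono
  intro acc k
  simp only []
  split_ifs <;> omega

-- any candidate value S = pvInnerSum l a c k with A's loop bounds is ≤ B
theorem pv_S_le_B (l : List Int) (a c : Nat) (hac : a ≤ c) (hc : c < l.length)
    (k : Int) (hk1 : 1 ≤ k) (hk2 : k ≤ pvWinMax l (a : Int) (c : Int)) :
    pvInnerSum l (a : Int) (c : Int) k ≤ get_max_orange_count_alt l := by
  -- the window and its maximum
  set w : List Int := (l.drop a).take (c + 1 - a) with hw
  have hwsub : w.Sublist l := (List.take_sublist _ _).trans (List.drop_sublist _ _)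
  have hwne : w ≠ [] := by
    have : w.length = min (c + 1 - a) (l.length - a) := by
      simp [hw, List.length_take, List.length_drop]
    intro h
    rw [h] at this
    simp at this
    omega
  obtain ⟨m, hm⟩ : ∃ m, PySem.List.max? w (fun x => x) = some m := by
    cases hmx : PySem.List.max? w (fun x => x) with
    | none => exact absurd ((PySem.List.max?_eq_none_iff _ _).mp hmx) hwne
    | some m => exact ⟨m, rfl⟩
  have hMx : pvWinMax l (a : Int) (c : Int) = m := by
    unfold pvWinMax
    have h1 : ((c : Int) + 1) = ((c + 1 : Nat) : Int) := by push_cast; ring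
    rw [h1, PySem.List.slice_natCast, ← hw, hm]
    rfl
  have hml : m ∈ l := hwsub.mem (PySem.List.max?_mem hm)
  have hkm : k ≤ m := by rw [hMx] at hk2; exact hk2
  -- the minimal element v of l with k ≤ v
  set F : List Int := l.filter (fun x => decide (k ≤ x)) with hF
  have hmF : m ∈ F := by
    rw [hF, List.mem_filter]
    exact ⟨hml, by simpa using hkm⟩
  obtain ⟨v, hv⟩ : ∃ v, PySem.List.min? F (fun x => x) = some v := by
    cases hmn : PySem.List.min? F (fun x => x) with
    | none =>
      have : F = [] := (PySem.List.min?_eq_none_iff _ _).mp hmn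
      rw [this] at hmF; cases hmF
    | some v => exact ⟨v, rfl⟩
  have hvF : v ∈ F := PySem.List.min?_mem hv
  have hvl : v ∈ l := (List.mem_filter.mp hvF).1
  have hkv : k ≤ v := by simpa using (List.mem_filter.mp hvF).2
  have hvmin : ∀ y ∈ F, v ≤ y := fun y hy => PySem.List.min?_isMin hv y hy
  -- count(≥k) over l equals count(≥v) over l
  have hcnt : l.countP (fun x => decide (k ≤ x)) = l.countP (fun x => decide (v ≤ x)) := by
    apply List.countP_congr
    intro x hx
    simp only [decide_eq_true_eq]
    constructor
    · intro hkx
      exact hvmin x (by rw [hF, List.mem_filter]; exact ⟨hx, by simpa using hkx⟩)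
    · intro hvx
      exact le_trans hkv hvx
  -- chain of inequalities
  have h1 : pvInnerSum l (a : Int) (c : Int) k
      = k * ((w.countP (fun x => decide (k ≤ x))) : Int) := pv_innerSum_eq l a c hc k
  have h2 : (w.countP (fun x => decide (k ≤ x)) : Int)
      ≤ (l.countP (fun x => decide (k ≤ x)) : Int) := by
    exact_mod_cast hwsub.countP_le
  have h3 : pvInnerSum l (a : Int) (c : Int) k ≤ k * (l.countP (fun x => decide (k ≤ x)) : Int) := by
    rw [h1]
    exact mul_le_mul_of_nonneg_left h2 (by omega)
  have h4 : k * (l.countP (fun x => decide (k ≤ x)) : Int)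
      ≤ v * (l.countP (fun x => decide (v ≤ x)) : Int) := by
    rw [hcnt]
    exact mul_le_mul_of_nonneg_right hkv (by positivity)
  have h5 : (if v > 0 then v * pvCountGe l v else 0) = v * (l.countP (fun x => decide (v ≤ x)) : Int) := by
    rw [if_pos (by omega), pv_countGe_eq]
  calc pvInnerSum l (a : Int) (c : Int) k
      ≤ v * (l.countP (fun x => decide (v ≤ x)) : Int) := le_trans h3 h4
    _ = (if v > 0 then v * pvCountGe l v else 0) := h5.symm
    _ ≤ get_max_orange_count_alt l := pv_cand_le_B l v hvl

-- A ≤ B : A's result is 0 or one of its candidate sums, and every candidate sum is ≤ B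
theorem pv_A_le_B (l : List Int) : get_max_orange_count l ≤ get_max_orange_count_alt l := by
  have hreach : get_max_orange_count l = 0 ∨
      ∃ i ∈ PySem.List.pyRange 0 (PySem.List.len l),
        ∃ j ∈ PySem.List.pyRange i (PySem.List.len l),
          ∃ k ∈ PySem.List.pyRange 1 (pvWinMax l i j + 1),
            get_max_orange_count l = pvInnerSum l i j k := by
    unfold get_max_orange_count
    apply pv_foldl_reach _ _
      (fun i r => ∃ j ∈ PySem.List.pyRange i (PySem.List.len l),
        ∃ k ∈ PySem.List.pyRange 1 (pvWinMax l i j + 1), r = pvInnerSum l i j k)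
    intro acc i
    have hmid := pv_foldl_reach (PySem.List.pyRange i (PySem.List.len l))
      (fun acc2 j =>
        (PySem.List.pyRange 1 (pvWinMax l i j + 1)).foldl (fun acc3 k =>
          let oc := pvInnerSum l i j k
          if oc > acc3 then oc else acc3) acc2)
      (fun j r => ∃ k ∈ PySem.List.pyRange 1 (pvWinMax l i j + 1), r = pvInnerSum l i j k) acc
      (by
        intro acc2 j
        have hin := pv_foldl_reach (PySem.List.pyRange 1 (pvWinMax l i j + 1))
          (fun acc3 k =>
            let oc := pvInnerSum l i j k
            if oc > acc3 then oc else acc3)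
          (fun k r => r = pvInnerSum l i j k) acc2
          (by
            intro acc3 k
            simp only []
            split_ifs with h
            · right; rfl
            · left; rfl)
        exact hin)
    exact hmid
  rcases hreach with h0 | ⟨i, hi, j, hj, k, hk, hS⟩
  · rw [h0]; exact pv_B_nonneg l
  · rw [PySem.List.mem_pyRange_one] at hi hj hk
    obtain ⟨hi0, hin⟩ := hi
    obtain ⟨hji, hjn⟩ := hj
    obtain ⟨hk1, hkM⟩ := hk
    have hlen : PySem.List.len l = (l.length : Int) := by simp [PySem.List.len]
    rw [hlen] at hin hjn
    have hia : i = ((i.toNat : Nat) : Int) := by omega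
    have hja : j = ((j.toNat : Nat) : Int) := by omega
    rw [hS, hia, hja]
    apply pv_S_le_B l i.toNat j.toNat (by omega) (by omega) k hk1
    rw [← hia, ← hja]
    omega

-- B ≤ A : B's result is 0 or a candidate v*count(≥v) with v ∈ l, v > 0; A reaches it with the
-- whole-array window and k = v
theorem pv_B_le_A (l : List Int) : get_max_orange_count_alt l ≤ get_max_orange_count l := by
  rw [pv_B_eq]
  rcases PySem.List.foldl_max_mem (l.map (fun v => if v > 0 then v * pvCountGe l v else 0)) 0
    with h0 | hmem
  · rw [h0]; exact pv_A_nonneg l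
  · obtain ⟨v, hvl, hveq⟩ := List.mem_map.mp hmem
    rw [← hveq]
    by_cases hv : v > 0
    · rw [if_pos hv] at hveq ⊢
      have hlne : l ≠ [] := List.ne_nil_of_mem hvl
      have hn1 : 0 < l.length := List.length_pos_iff.mpr hlne
      -- the candidate value equals A's inner sum at i=0, j=n-1, k=v
      have hSeq : pvInnerSum l (0 : Int) ((l.length - 1 : Nat) : Int) v = v * pvCountGe l v := by
        have := pv_innerSum_eq l 0 (l.length - 1) (by omega) v
        rw [pv_window_all l hlne] at this
        rw [pv_countGe_eq]
        exact_mod_cast this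
      -- v is within A's k-range at that window
      have hvM : v ≤ pvWinMax l (0 : Int) ((l.length - 1 : Nat) : Int) := by
        unfold pvWinMax
        have h1 : (((l.length - 1 : Nat) : Int) + 1) = ((l.length - 1 + 1 : Nat) : Int) := by
          omega
        rw [h1, PySem.List.slice_zero_start, PySem.List.slice_to_natCast]
        have hwl' : l.take (l.length - 1 + 1) = l := by
          apply List.take_of_length_le; omega
        rw [hwl']
        obtain ⟨m, hm⟩ : ∃ m, PySem.List.max? l (fun x => x) = some m := by
          cases hmx : PySem.List.max? l (fun x => x) with
          | none => exact absurd ((PySem.List.max?_eq_none_iff _ _).mp hmx) hlne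
          | some m => exact ⟨m, rfl⟩
        rw [hm]
        exact PySem.List.max?_isMax hm v hvl
      -- climb A's three folds
      unfold get_max_orange_count
      have hlen : PySem.List.len l = (l.length : Int) := by simp [PySem.List.len]
      have hmono3 : ∀ (acc : Int) (k : Int),
          acc ≤ (if pvInnerSum l (0:Int) ((l.length - 1 : Nat) : Int) k > acc
                 then pvInnerSum l (0:Int) ((l.length - 1 : Nat) : Int) k else acc) := by
        intro acc k
        split_ifs <;> omega
      apply pv_foldl_ge _ _ _
        (by
          intro acc i
          apply pv_foldl_mono
          intro acc j
          apply pv_foldl_mono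
          intro acc k
          simp only []
          split_ifs <;> omega)
        (0 : Int)
        (by rw [PySem.List.mem_pyRange_one, hlen]; omega)
      intro acc
      apply pv_foldl_ge _ _ _
        (by
          intro acc j
          apply pv_foldl_mono
          intro acc k
          simp only []
          split_ifs <;> omega)
        (((l.length - 1 : Nat) : Int))
        (by rw [PySem.List.mem_pyRange_one, hlen]; omega)
      intro acc2
      apply pv_foldl_ge _ _ _
        (by
          intro acc3 k
          simp only []
          split_ifs <;> omega)
        v
        (by rw [PySem.List.mem_pyRange_one]; exact ⟨by omega, by omega⟩)
      intro acc3
      simp only []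
      rw [hSeq]
      split_ifs <;> omega
    · rw [if_neg hv] at hveq ⊢
      exact pv_A_nonneg l

-- ===== VERDICT (by name: the statement is the Claim_ definition above) =====
theorem get_max_orange_count_spec : Claim_equal_get_max_orange_count := by
  intro l _
  unfold Spec_get_max_orange_count
  exact le_antisymm (pv_A_le_B l) (pv_B_le_A l)
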